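-- pv_equiv track=rewrite | github.com/valerieyew/volunteer_fyp | services/transport/src/service/bus_combis.py | get_bus_combi_for_one_n_cluster
-- ===== SOURCE A (Python) =====
-- import itertools
--
-- def get_bus_combi_for_one_n_cluster(no_of_clusters, sorted_no_of_people, total_passengers, buses, bus_capacities):
--
--     # bus combis without sorting
--     bus_combis_for_n_cluster = []
--     for combination in itertools.combinations_with_replacement(bus_capacities, no_of_clusters):
--         if sum(combination) > total_passengers:
--             bus_combis_for_n_cluster.append(combination)
--
--     # cost dictionary without sorting
--     current_cost_dictionary = {}
--     for i in range(len(bus_combis_for_n_cluster)):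
--         current_combi = bus_combis_for_n_cluster[i]
--         current_cost = get_cost_of_one_bus_combination_without_duration(buses, current_combi)
--         current_cost_dictionary[i] = current_cost
--
--     # sort cost dictionary
--     sorted_cost_dict = sorted(current_cost_dictionary.items(), key=lambda x: x[1])
--
--     sorted_bus_combis = []
--     for index_and_cost in sorted_cost_dict:
--         index = index_and_cost[0]
--         sorted_bus_combis.append(bus_combis_for_n_cluster[index])
--
--     for sorted_bus_combi in sorted_bus_combis:
--         if all(x < y for x, y in zip(tuple(sorted_no_of_people), sorted_bus_combi)):
--             return sorted_bus_combi
--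
--     return None
--
-- def get_cost_of_one_bus_combination_without_duration(buses, bus_combi):
--     cost = 0
--     for current_bus_capacity in bus_combi:
--         for bus in buses:
--             if current_bus_capacity == bus['capacity']:
--                 cost += bus['price_per_hour']
--                 break
--     return cost
-- ===== SOURCE B (Python) =====
-- def get_bus_combi_for_one_n_cluster(no_of_clusters, sorted_no_of_people, total_passengers, buses, bus_capacities):
--     import itertools
--     people = tuple(sorted_no_of_people)
--     best = None
--     best_cost = None
--     for combi in itertools.combinations_with_replacement(bus_capacities, no_of_clusters):
--         if sum(combi) <= total_passengers:
--             continue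
--         if not all(x < y for x, y in zip(people, combi)):
--             continue
--         cost = get_cost_of_one_bus_combination_without_duration(buses, combi)
--         if best_cost is None or cost < best_cost:
--             best_cost = cost
--             best = combi
--     return best
--
-- def get_cost_of_one_bus_combination_without_duration(buses, bus_combi):
--     cost = 0
--     for current_bus_capacity in bus_combi:
--         for bus in buses:
--             if current_bus_capacity == bus['capacity']:
--                 cost += bus['price_per_hour']
--                 break
--     return cost
-- ===== Notes on version B (the rewrite author's own statement) =====
-- stated objective: simpler
-- what changed: Replaces A's build-qualifying-list / index-keyed-cost-dict / stable-sort / rebuild-by-index / scan pipeline with a single pass over the combinations that keeps the running strictly-cheapest fully-qualifying combination (first-encountered wins ties, matching A's stable sort), costing only the combinations that qualify.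
import Mathlib
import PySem

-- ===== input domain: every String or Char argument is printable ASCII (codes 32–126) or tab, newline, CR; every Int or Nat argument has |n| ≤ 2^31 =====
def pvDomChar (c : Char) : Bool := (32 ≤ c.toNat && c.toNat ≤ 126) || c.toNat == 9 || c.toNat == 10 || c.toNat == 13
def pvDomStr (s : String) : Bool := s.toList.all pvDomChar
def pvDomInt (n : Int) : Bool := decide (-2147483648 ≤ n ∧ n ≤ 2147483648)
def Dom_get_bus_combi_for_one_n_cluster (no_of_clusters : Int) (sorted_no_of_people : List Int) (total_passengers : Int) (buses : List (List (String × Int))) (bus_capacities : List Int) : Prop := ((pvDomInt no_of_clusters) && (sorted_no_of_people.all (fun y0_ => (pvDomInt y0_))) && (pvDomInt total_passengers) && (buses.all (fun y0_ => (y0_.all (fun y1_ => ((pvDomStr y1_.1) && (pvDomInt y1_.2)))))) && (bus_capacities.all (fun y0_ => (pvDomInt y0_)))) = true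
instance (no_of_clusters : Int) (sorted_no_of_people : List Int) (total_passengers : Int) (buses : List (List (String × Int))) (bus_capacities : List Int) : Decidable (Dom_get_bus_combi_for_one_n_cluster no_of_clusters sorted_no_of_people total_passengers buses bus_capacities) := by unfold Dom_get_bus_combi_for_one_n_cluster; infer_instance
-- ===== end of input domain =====

-- B replaces A's build-list / cost-dict / stable-sort / rebuild / scan pipeline by a single
-- running-minimum pass over the combinations, costing only qualifying ones (objective: simpler).

-- ===== PORT A =====
-- itertools.combinations_with_replacement(xs, r), in itertools' order (shared by both ports)
def pvCWR (xs : List Int) (r : Nat) : List (List Int) :=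
  match r, xs with
  | 0, _ => [[]]
  | _ + 1, [] => []
  | r + 1, x :: rest => (pvCWR (x :: rest) r).map (fun c => x :: c) ++ pvCWR rest (r + 1)
termination_by (xs.length, r)

-- inner loop of get_cost_of_one_bus_combination_without_duration: scan buses, break at first
-- capacity match.  bus['capacity'] / bus['price_per_hour'] is first-match lookup; the `.getD 0`
-- is exact under Pre_ (both keys present in every bus dict).
def pvBusScanA (buses : List (List (String × Int))) (cap : Int) : Int :=
  match buses with
  | [] => 0
  | b :: rest =>
      if (List.lookup "capacity" b).getD 0 = cap then (List.lookup "price_per_hour" b).getD 0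
      else pvBusScanA rest cap

-- get_cost_of_one_bus_combination_without_duration
def pvCostA (buses : List (List (String × Int))) (combi : List Int) : Int :=
  combi.foldl (fun cost cap => cost + pvBusScanA buses cap) 0

def get_bus_combi_for_one_n_cluster (no_of_clusters : Int) (sorted_no_of_people : List Int) (total_passengers : Int) (buses : List (List (String × Int))) (bus_capacities : List Int) : Option (List Int) :=
  let combos := pvCWR bus_capacities no_of_clusters.toNat
  let qualifying := combos.foldl (fun acc c => if total_passengers < c.sum then acc ++ [c] else acc) []
  let costDict := (PySem.List.pyRange 0 (qualifying.length : Int) 1).foldl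
      (fun d i => d.insert i (pvCostA buses (PySem.List.pyGetD qualifying i []))) PySem.Dict.empty
  let sortedCost := PySem.List.sorted costDict.items (fun p => p.2) false
  let sortedCombis := sortedCost.foldl (fun acc p => acc ++ [PySem.List.pyGetD qualifying p.1 []]) []
  sortedCombis.find? (fun c => (List.zip sorted_no_of_people c).all (fun q => decide (q.1 < q.2)))

-- ===== PORT B =====
def get_bus_combi_for_one_n_cluster_alt (no_of_clusters : Int) (sorted_no_of_people : List Int) (total_passengers : Int) (buses : List (List (String × Int))) (bus_capacities : List Int) : Option (List Int) :=
  let best := (pvCWR bus_capacities no_of_clusters.toNat).foldl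
      (fun (best : Option (List Int × Int)) combi =>
        if combi.sum ≤ total_passengers then best
        else if ¬ ((List.zip sorted_no_of_people combi).all (fun q => decide (q.1 < q.2)) = true) then best
        else
          let cost := pvCostA buses combi
          match best with
          | none => some (combi, cost)
          | some b => if cost < b.2 then some (combi, cost) else some b) none
  best.map (fun b => b.1)

-- ===== PRECONDITION & SPEC =====
-- Pre_ excludes no_of_clusters < 0 (Python: ValueError from combinations_with_replacement) and, when
-- some combination can exceed total_passengers so the cost helper is reached, any bus dict missing the
-- 'capacity' or 'price_per_hour' key (Python: KeyError).  On a few such inputs A still returns, the bad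
-- bus being hidden behind an earlier capacity match's break — see the cite.
def Pre_get_bus_combi_for_one_n_cluster (no_of_clusters : Int) (sorted_no_of_people : List Int) (total_passengers : Int) (buses : List (List (String × Int))) (bus_capacities : List Int) : Prop :=
  0 ≤ no_of_clusters ∧
    ((1 ≤ no_of_clusters ∧ ∃ c ∈ bus_capacities, total_passengers < no_of_clusters * c) →
      ∀ b ∈ buses, (List.lookup "capacity" b).isSome = true ∧ (List.lookup "price_per_hour" b).isSome = true)
instance (no_of_clusters : Int) (sorted_no_of_people : List Int) (total_passengers : Int) (buses : List (List (String × Int))) (bus_capacities : List Int) : Decidable (Pre_get_bus_combi_for_one_n_cluster no_of_clusters sorted_no_of_people total_passengers buses bus_capacities) := by unfold Pre_get_bus_combi_for_one_n_cluster; infer_instance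

def pvWitness_get_bus_combi_for_one_n_cluster : Int × List Int × Int × (List (List (String × Int))) × List Int :=
  (1, [2], 0, [[("capacity", 5), ("price_per_hour", 3)]], [5])

def Spec_get_bus_combi_for_one_n_cluster (no_of_clusters : Int) (sorted_no_of_people : List Int) (total_passengers : Int) (buses : List (List (String × Int))) (bus_capacities : List Int) (out : Option (List Int)) : Prop := out = get_bus_combi_for_one_n_cluster_alt no_of_clusters sorted_no_of_people total_passengers buses bus_capacities
instance (no_of_clusters : Int) (sorted_no_of_people : List Int) (total_passengers : Int) (buses : List (List (String × Int))) (bus_capacities : List Int) (out : Option (List Int)) : Decidable (Spec_get_bus_combi_for_one_n_cluster no_of_clusters sorted_no_of_people total_passengers buses bus_capacities out) := by unfold Spec_get_bus_combi_for_one_n_cluster; infer_instance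

-- ===== CLAIM (what is proved, stated in full; the proofs are below) =====
def Claim_equal_get_bus_combi_for_one_n_cluster : Prop := ∀ (no_of_clusters : Int) (sorted_no_of_people : List Int) (total_passengers : Int) (buses : List (List (String × Int))) (bus_capacities : List Int), Dom_get_bus_combi_for_one_n_cluster no_of_clusters sorted_no_of_people total_passengers buses bus_capacities → Pre_get_bus_combi_for_one_n_cluster no_of_clusters sorted_no_of_people total_passengers buses bus_capacities → Spec_get_bus_combi_for_one_n_cluster no_of_clusters sorted_no_of_people total_passengers buses bus_capacities (get_bus_combi_for_one_n_cluster no_of_clusters sorted_no_of_people total_passengers buses bus_capacities)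

-- ===== LEMMAS AND PROOFS =====

-- lexicographic (cost, original index) strict order on the (index, cost) pairs A sorts
def pvLexLt (a b : Int × Int) : Prop := a.2 < b.2 ∨ (a.2 = b.2 ∧ a.1 < b.1)

-- one step of the running strict minimum over (index, cost) pairs
def pvMinStep {α : Type} (best : Option (α × Int)) (e : α × Int) : Option (α × Int) :=
  match best with
  | none => some e
  | some b => if e.2 < b.2 then some e else some b

-- one step of the running strict minimum, keyed by a cost function
def pvArgminStep {α : Type} (c : α → Int) (best : Option α) (q : α) : Option α :=
  match best with
  | none => some q
  | some b => if c q < c b then some q else some b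

theorem pv_pairwise_insertBy (x : Int × Int) (S : List (Int × Int))
    (hS : S.Pairwise pvLexLt) (hx : ∀ y ∈ S, y.1 < x.1) :
    (PySem.List.insertBy (fun a b => decide (a.2 < b.2)) x S).Pairwise pvLexLt := by
  induction S with
  | nil => simp [PySem.List.insertBy]
  | cons y ys ih =>
      rw [List.pairwise_cons] at hS
      obtain ⟨hy, hys⟩ := hS
      simp only [PySem.List.insertBy]
      by_cases hxy : x.2 < y.2
      · rw [if_pos (by simpa using hxy)]
        refine List.Pairwise.cons ?_ (List.Pairwise.cons hy hys)
        intro z hz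
        rcases List.mem_cons.mp hz with rfl | hz
        · exact Or.inl hxy
        · exact Or.inl (lt_of_lt_of_le hxy (by rcases hy z hz with h | ⟨h, _⟩ <;> omega))
      · rw [if_neg (by simpa using hxy)]
        refine List.Pairwise.cons ?_ (ih hys (fun z hz => hx z (List.mem_cons_of_mem _ hz)))
        intro z hz
        rcases (PySem.List.mem_insertBy _ _ _ _).mp hz with rfl | hz
        · have hyx := hx y (List.mem_cons_self ..)
          unfold pvLexLt; omega
        · exact hy z hz

theorem pv_find_insertBy (p : Int × Int → Bool) (x : Int × Int) (S : List (Int × Int))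
    (hS : S.Pairwise pvLexLt) :
    (PySem.List.insertBy (fun a b => decide (a.2 < b.2)) x S).find? p
      = match S.find? p with
        | none => if p x then some x else none
        | some m => if p x ∧ x.2 < m.2 then some x else some m := by
  induction S with
  | nil => simp [PySem.List.insertBy, List.find?]
  | cons y ys ih =>
      rw [List.pairwise_cons] at hS
      obtain ⟨hy, hys⟩ := hS
      simp only [PySem.List.insertBy]
      by_cases hxy : x.2 < y.2
      · rw [if_pos (decide_eq_true hxy)]
        by_cases hpx : p x = true
        · rw [List.find?_cons_of_pos hpx]
          cases hfy : List.find? p (y :: ys) with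
          | none => simp [hpx]
          | some m =>
              have hm : m ∈ y :: ys := List.mem_of_find?_eq_some hfy
              have hym : y.2 ≤ m.2 := by
                rcases List.mem_cons.mp hm with rfl | hm
                · omega
                · rcases hy m hm with h | ⟨h, _⟩ <;> omega
              exact (if_pos (⟨hpx, by omega⟩ : p x = true ∧ x.2 < m.2)).symm
      
        · rw [List.find?_cons_of_neg (by simpa using hpx)]
          cases hfy : List.find? p (y :: ys) with
          | none => simp [hpx]
          | some m => simp [hpx]
      · rw [if_neg (by simpa using hxy)]
        by_cases hpy : p y = true
        · rw [List.find?_cons_of_pos hpy, List.find?_cons_of_pos hpy]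
          exact (if_neg (fun h : p x = true ∧ x.2 < y.2 => hxy h.2)).symm
        · rw [List.find?_cons_of_neg (by simpa using hpy), List.find?_cons_of_neg (by simpa using hpy)]
          exact ih hys

-- sorted of a snoc is an insertion into the sorted prefix (stable insertion sort)
theorem pv_sorted_append (L : List (Int × Int)) (x : Int × Int) :
    PySem.List.sorted (L ++ [x]) (fun q => q.2) false
      = PySem.List.insertBy (fun a b => decide (a.2 < b.2)) x (PySem.List.sorted L (fun q => q.2) false) := by
  rw [PySem.List.sorted_eq_foldl_insertBy, PySem.List.sorted_eq_foldl_insertBy, List.foldl_append,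
    List.foldl_cons, List.foldl_nil]

theorem pv_sorted_lex (L : List (Int × Int)) (hL : L.Pairwise (fun a b => a.1 < b.1)) :
    (PySem.List.sorted L (fun p => p.2) false).Pairwise pvLexLt := by
  induction L using List.reverseRecOn with
  | nil => simp [PySem.List.sorted]
  | append_singleton L x ih =>
      rw [List.pairwise_append] at hL
      obtain ⟨hL1, _, hcross⟩ := hL
      rw [pv_sorted_append]
      refine pv_pairwise_insertBy x _ (ih hL1) ?_
      intro y hy
      exact hcross y ((PySem.List.mem_sorted _ _ _ _).mp hy) x (List.mem_singleton_self x)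

-- first hit of the stably cost-sorted list = running strict minimum over the original order
theorem pv_find_sorted (L : List (Int × Int)) (p : Int × Int → Bool)
    (hL : L.Pairwise (fun a b => a.1 < b.1)) :
    (PySem.List.sorted L (fun q => q.2) false).find? p = (L.filter p).foldl pvMinStep none := by
  induction L using List.reverseRecOn with
  | nil => simp [PySem.List.sorted]
  | append_singleton L x ih =>
      rw [List.pairwise_append] at hL
      obtain ⟨hL1, _, _⟩ := hL
      rw [pv_sorted_append, pv_find_insertBy p x _ (pv_sorted_lex L hL1), ih hL1,
        List.filter_append, List.foldl_append]
      by_cases hpx : p x = true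
      · simp only [List.filter_cons, hpx, if_pos, List.filter_nil, List.foldl_cons, List.foldl_nil]
        cases hf : List.foldl pvMinStep none (List.filter p L) with
        | none => simp [pvMinStep]
        | some m => simp [pvMinStep]
      · simp only [List.filter_cons, hpx, List.filter_nil]
        cases hf : List.foldl pvMinStep none (List.filter p L) with
        | none => simp
        | some m => simp

-- a running minimum that stores an image alongside the cost is the image of the running minimum
theorem pv_minstep_map {α β : Type} (G : List α) (c : α → Int) (ψ : α → β × Int)
    (h : ∀ q, (ψ q).2 = c q) (s : Option α) :
    G.foldl (fun best q => pvMinStep best (ψ q)) (s.map ψ)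
      = (G.foldl (pvArgminStep c) s).map ψ := by
  induction G generalizing s with
  | nil => rfl
  | cons q G ih =>
      simp only [List.foldl_cons]
      cases s with
      | none => exact ih (some q)
      | some b =>
          simp only [Option.map_some]
          have e1 : pvMinStep (some (ψ b)) (ψ q) = if c q < c b then some (ψ q) else some (ψ b) := by
            show (if (ψ q).2 < (ψ b).2 then some (ψ q) else some (ψ b)) = _
            rw [h q, h b]
          have e2 : pvArgminStep c (some b) q = if c q < c b then some q else some b := rfl
          rw [e1, e2]
          by_cases hc : c q < c b
          · rw [if_pos hc, if_pos hc, ← Option.map_some]; exact ih (some q)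
          · rw [if_neg hc, if_neg hc, ← Option.map_some]; exact ih (some b)

-- the running minimum of an image list is the image of the running minimum
theorem pv_argmin_map {α β : Type} (G : List α) (c : β → Int) (ψ : α → β) (s : Option α) :
    (G.map ψ).foldl (pvArgminStep c) (s.map ψ)
      = (G.foldl (pvArgminStep (fun a => c (ψ a))) s).map ψ := by
  induction G generalizing s with
  | nil => rfl
  | cons q G ih =>
      simp only [List.map_cons, List.foldl_cons]
      cases s with
      | none => exact ih (some q)
      | some b =>
          simp only [Option.map_some]
          have e1 : pvArgminStep c (some (ψ b)) (ψ q) = if c (ψ q) < c (ψ b) then some (ψ q) else some (ψ b) := rfl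
          have e2 : pvArgminStep (fun a => c (ψ a)) (some b) q = if c (ψ q) < c (ψ b) then some q else some b := rfl
          rw [e1, e2]
          by_cases hc : c (ψ q) < c (ψ b)
          · rw [if_pos hc, if_pos hc, ← Option.map_some]; exact ih (some q)
          · rw [if_neg hc, if_neg hc, ← Option.map_some]; exact ih (some b)

theorem pv_minstep_map_none {α β : Type} (G : List α) (c : α → Int) (ψ : α → β × Int)
    (h : ∀ q, (ψ q).2 = c q) :
    G.foldl (fun best q => pvMinStep best (ψ q)) none = (G.foldl (pvArgminStep c) none).map ψ := by
  simpa using pv_minstep_map G c ψ h none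

theorem pv_argmin_map_none {α β : Type} (G : List α) (c : β → Int) (ψ : α → β) :
    (G.map ψ).foldl (pvArgminStep c) none = (G.foldl (pvArgminStep (fun a => c (ψ a))) none).map ψ := by
  simpa using pv_argmin_map G c ψ none

theorem pv_map_getD_range {α : Type} (xs : List α) (d : α) :
    (List.range xs.length).map (fun k => xs.getD k d) = xs := by
  apply List.ext_getElem
  · simp
  · intro i h1 h2
    simp [List.getD_eq_getElem?_getD, List.getElem?_eq_getElem h2]

-- ===== VERDICT (by name: the statement is the Claim_ definition above) =====
theorem get_bus_combi_for_one_n_cluster_spec : Claim_equal_get_bus_combi_for_one_n_cluster := by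
  intro n people total buses caps _ _
  unfold Spec_get_bus_combi_for_one_n_cluster get_bus_combi_for_one_n_cluster get_bus_combi_for_one_n_cluster_alt
  dsimp only
  rw [PySem.List.foldl_append_ite_eq_filter, List.nil_append]
  rw [PySem.List.pyRange_zero_natCast]
  rw [PySem.Dict.items_foldl_insert_fresh _ (fun i => i)
        (fun i => pvCostA buses (PySem.List.pyGetD (List.filter (fun c => decide (total < c.sum)) (pvCWR caps n.toNat)) i [])) _
        (by intro a _; exact PySem.Dict.contains_empty _)
        (by
          refine List.Nodup.map (fun a b h => h) ?_
          refine List.Nodup.map ?_ List.nodup_range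
          intro a b h
          simpa using h)]
  rw [show (PySem.Dict.empty : PySem.Dict Int Int).items = [] from rfl, List.nil_append, List.map_map]
  simp only [Function.comp_def, PySem.List.pyGetD_natCast]
  rw [PySem.List.foldl_append_singleton_eq_map, List.nil_append, List.find?_map]
  rw [pv_find_sorted _ _ (List.pairwise_map.mpr (List.pairwise_lt_range.imp (fun h => by simpa using h)))]
  rw [List.filter_map, List.foldl_map]
  simp only [Function.comp_def, PySem.List.pyGetD_natCast]
  rw [pv_minstep_map_none _ (fun k => pvCostA buses ((List.filter (fun x => decide (total < x.sum)) (pvCWR caps n.toNat)).getD k [])) _ (fun q => rfl)]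
  rw [Option.map_map]
  simp only [Function.comp_def, PySem.List.pyGetD_natCast]
  -- ===== B side =====
  rw [show (fun (best : Option (List Int × Int)) (combi : List Int) =>
        if combi.sum ≤ total then best
        else
          if ¬((people.zip combi).all fun q => decide (q.1 < q.2)) = true then best
          else
            match best with
            | none => some (combi, pvCostA buses combi)
            | some b => if pvCostA buses combi < b.2 then some (combi, pvCostA buses combi) else some b)
      = (fun best combi =>
          if ((people.zip combi).all fun q => decide (q.1 < q.2)) = true ∧ total < combi.sum
          then pvMinStep best (combi, pvCostA buses combi) else best) from by
        funext best combi
        by_cases h1 : combi.sum ≤ total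
        · rw [if_pos h1, if_neg (fun hc => absurd hc.2 (not_lt.mpr h1))]
        · rw [if_neg h1]
          by_cases h2 : ((people.zip combi).all fun q => decide (q.1 < q.2)) = true
          · rw [if_neg (not_not_intro h2), if_pos ⟨h2, not_le.mp h1⟩]
            cases best <;> rfl
          · rw [if_pos h2, if_neg (fun hc => h2 hc.1)]]
  rw [PySem.List.foldl_ite_eq_foldl_filter]
  rw [pv_minstep_map_none _ (pvCostA buses) _ (fun q => rfl)]
  rw [Option.map_map]
  simp only [Function.comp_def]
  rw [show (fun (x : List Int) => decide (((people.zip x).all fun q => decide (q.1 < q.2)) = true ∧ total < x.sum))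
      = (fun x => ((people.zip x).all fun q => decide (q.1 < q.2)) && decide (total < x.sum)) from by
        funext x; simp]
  rw [← List.filter_filter]
  rw [show List.filter (fun c => (people.zip c).all fun q => decide (q.1 < q.2))
        (List.filter (fun x => decide (total < x.sum)) (pvCWR caps n.toNat))
      = (List.filter
          (fun x => (people.zip ((List.filter (fun x => decide (total < x.sum)) (pvCWR caps n.toNat)).getD x [])).all
            fun q => decide (q.1 < q.2))
          (List.range (List.filter (fun x => decide (total < x.sum)) (pvCWR caps n.toNat)).length)).map
        (fun k => (List.filter (fun x => decide (total < x.sum)) (pvCWR caps n.toNat)).getD k []) from by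
        conv_lhs => rw [← pv_map_getD_range (List.filter (fun x => decide (total < x.sum)) (pvCWR caps n.toNat)) []]
        rw [List.filter_map]
        simp only [Function.comp_def]]
  rw [pv_argmin_map_none]
  simp only [Option.map_id']
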